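-- pv_equiv track=rewrite | github.com/debdutgoswami/anonymous-coding-problems | Question 31-40/Q33/Q33.py | alternatingCharacters
-- ===== SOURCE A (Python) =====
-- def alternatingCharacters(s):
--     final = s[0]
--     for i in range(1,len(s)):
--         if final[len(final)-1]==s[i]:
--             continue
--         else:
--             final+=s[i]
--     return len(s)-len(final)
-- ===== SOURCE B (Python) =====
-- def alternatingCharacters(s):
--     # single pass: count positions where a char equals its predecessor
--     return sum(1 for a, b in zip(s, s[1:]) if a == b)
-- ===== Notes on version B (the rewrite author's own statement) =====
-- stated objective: idiomatic
-- what changed: B counts adjacent equal pairs in one zip pass instead of building a deduplicated copy of the string by repeated concatenation and subtracting its length.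
import Mathlib
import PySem

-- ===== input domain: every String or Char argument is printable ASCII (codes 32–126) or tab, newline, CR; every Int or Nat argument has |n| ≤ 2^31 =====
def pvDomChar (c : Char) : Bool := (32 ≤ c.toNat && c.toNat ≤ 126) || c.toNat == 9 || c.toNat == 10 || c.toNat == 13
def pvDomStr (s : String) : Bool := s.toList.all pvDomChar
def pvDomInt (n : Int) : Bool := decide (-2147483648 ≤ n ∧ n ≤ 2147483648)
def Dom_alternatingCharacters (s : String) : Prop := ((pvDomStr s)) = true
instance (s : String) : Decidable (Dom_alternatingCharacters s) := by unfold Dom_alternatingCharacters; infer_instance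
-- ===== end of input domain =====

-- B replaces A's repeated string concatenation (build a deduplicated copy of s,
-- subtract its length) with a single zip pass counting adjacent equal characters.

-- ===== PORT A =====
-- A: final = s[0]; for each later char, append it to final unless it equals
-- final's last char (final[len(final)-1]); return len(s) - len(final).
-- On the empty string A raises IndexError at s[0] (excluded by Pre_); the
-- match's [] branch is unreachable inside Pre_.
def alternatingCharacters (s : String) : Int :=
  match s.toList with
  | [] => 0
  | c :: rest =>
    let final := rest.foldl
      (fun f x => if f.getLast! == x then f else f ++ [x]) [c]
    (s.toList.length : Int) - (final.length : Int)

-- ===== PORT B =====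
-- B: sum(1 for a, b in zip(s, s[1:]) if a == b)
def alternatingCharacters_alt (s : String) : Int :=
  (((s.toList.zip s.toList.tail).filter (fun p => p.1 == p.2)).length : Int)

-- ===== PRECONDITION & SPEC =====
-- Pre_ excludes only the empty string, where A raises IndexError at s[0].
def Pre_alternatingCharacters (s : String) : Prop := s ≠ ""
instance (s : String) : Decidable (Pre_alternatingCharacters s) := by unfold Pre_alternatingCharacters; infer_instance
def pvWitness_alternatingCharacters : String := "aab"

def Spec_alternatingCharacters (s : String) (out : Int) : Prop := out = alternatingCharacters_alt s
instance (s : String) (out : Int) : Decidable (Spec_alternatingCharacters s out) := by unfold Spec_alternatingCharacters; infer_instance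

-- ===== CLAIM (what is proved, stated in full; the proofs are below) =====
def Claim_equal_alternatingCharacters : Prop := ∀ (s : String), Dom_alternatingCharacters s → Pre_alternatingCharacters s → Spec_alternatingCharacters s (alternatingCharacters s)

-- ===== LEMMAS AND PROOFS =====

-- number of adjacent equal pairs, as counted by B
def pvPairs (l : List Char) : Nat :=
  ((l.zip l.tail).filter (fun p => p.1 == p.2)).length

theorem pvPairs_cons_cons (a b : Char) (t : List Char) :
    pvPairs (a :: b :: t) = (if a == b then 1 else 0) + pvPairs (b :: t) := by
  by_cases h : a = b <;> simp [pvPairs, h, Nat.add_comm]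

theorem pvPairs_single (a : Char) : pvPairs [a] = 0 := by simp [pvPairs]

-- loop invariant for A's fold: the accumulator's last char is c, and
-- (length of result) + (pairs in c::rest) = (length of acc) + (length of rest)
theorem pv_loop (rest : List Char) : ∀ (acc : List Char) (c : Char),
    acc.getLast? = some c →
    (rest.foldl (fun f x => if f.getLast! == x then f else f ++ [x]) acc).length
      + pvPairs (c :: rest) = acc.length + rest.length := by
  induction rest with
  | nil => intro acc c _; simp [pvPairs_single]
  | cons x t ih =>
    intro acc c hlast
    have hbang : acc.getLast! = c := by
      simp [List.getLast!, List.getLast?] at hlast ⊢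
      cases acc with
      | nil => simp at hlast
      | cons a as => simpa using hlast
    rw [pvPairs_cons_cons]
    by_cases hcx : c = x
    · have hstep : (acc.getLast! == x) = true := by rw [hbang]; simp [hcx]
      simp only [List.foldl_cons, hstep, if_true]
      have := ih acc x (hcx ▸ hlast)
      have hx : (c == x) = true := by simp [hcx]
      simp only [hx, if_true, List.length_cons] at this ⊢
      omega
    · have hstep : (acc.getLast! == x) = false := by rw [hbang]; simp [hcx]
      simp only [List.foldl_cons, hstep, Bool.false_eq_true, if_false]
      have hlast' : (acc ++ [x]).getLast? = some x := by simp
      have := ih (acc ++ [x]) x hlast'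
      have hx : (c == x) = false := by simp [hcx]
      simp only [hx, Bool.false_eq_true, if_false]
      simp [List.length_append] at this ⊢
      omega

theorem pv_alt_eq_pairs (s : String) :
    alternatingCharacters_alt s = (pvPairs s.toList : Int) := rfl

-- ===== VERDICT (by name: the statement is the Claim_ definition above) =====
theorem alternatingCharacters_spec : Claim_equal_alternatingCharacters := by
  intro s _ hpre
  unfold Spec_alternatingCharacters alternatingCharacters
  rw [pv_alt_eq_pairs]
  have hs : s.toList ≠ [] := by
    intro h
    exact hpre (by simpa using congrArg String.ofList h)
  cases hl : s.toList with
  | nil => exact absurd hl hs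
  | cons c rest =>
    have h := pv_loop rest [c] c (by simp)
    simp only [List.length_cons, List.length_nil] at h ⊢
    omega
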